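-- pv_equiv track=rewrite | github.com/liuran2011/analyze | analyze/search_engine/sogou/html_parser.py | _pagebar_div
-- ===== SOURCE A (Python) =====
-- def _pagebar_div(attrs):
--     if len(attrs)==0:
--         return False
--
--     class_p=False
--     id_container=False
--
--     for attr in attrs:
--         if attr[0]=='class' and attr[1]=='p':
--             class_p=True
--         elif attr[0]=='id' and attr[1]=='pagebar_container':
--             id_container=True
--
--     if class_p and id_container:
--         return True
--
--     return False
-- ===== SOURCE B (Python) =====
-- def _pagebar_div(attrs):
--     return any(a[0] == 'class' and a[1] == 'p' for a in attrs) and \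
--            any(a[0] == 'id' and a[1] == 'pagebar_container' for a in attrs)
-- ===== Notes on version B (the rewrite author's own statement) =====
-- stated objective: simpler
-- what changed: Replaced the flag-maintaining loop with two short-circuiting any() existence scans combined with 'and'; the empty-list guard and the boolean flags disappear.
import Mathlib
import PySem

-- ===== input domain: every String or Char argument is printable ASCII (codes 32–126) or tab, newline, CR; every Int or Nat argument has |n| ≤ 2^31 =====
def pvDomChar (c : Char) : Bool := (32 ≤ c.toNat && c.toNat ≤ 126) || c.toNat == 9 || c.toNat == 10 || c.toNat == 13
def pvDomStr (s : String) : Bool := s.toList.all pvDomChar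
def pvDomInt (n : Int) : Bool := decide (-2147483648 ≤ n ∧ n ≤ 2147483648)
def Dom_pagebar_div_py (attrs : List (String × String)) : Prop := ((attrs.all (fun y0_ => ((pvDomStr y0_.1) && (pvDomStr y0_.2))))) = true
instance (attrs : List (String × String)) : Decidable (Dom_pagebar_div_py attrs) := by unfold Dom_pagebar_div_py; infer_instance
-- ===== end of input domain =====

-- ===== PORT A =====
-- B simplifies A's flag-maintaining loop to two short-circuiting existence scans (objective: simpler).
def pagebar_div_py (attrs : List (String × String)) : Bool :=
  if attrs.length = 0 then false
  else
    let st := attrs.foldl (fun (s : Bool × Bool) attr =>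
      if attr.1 == "class" && attr.2 == "p" then (true, s.2)
      else if attr.1 == "id" && attr.2 == "pagebar_container" then (s.1, true)
      else s) (false, false)
    if st.1 && st.2 then true else false

-- ===== PORT B =====
def pagebar_div_py_alt (attrs : List (String × String)) : Bool :=
  (attrs.any (fun a => a.1 == "class" && a.2 == "p")) &&
  (attrs.any (fun a => a.1 == "id" && a.2 == "pagebar_container"))

-- ===== PRECONDITION & SPEC =====
def Spec_pagebar_div_py (attrs : List (String × String)) (out : Bool) : Prop := out = pagebar_div_py_alt attrs
instance (attrs : List (String × String)) (out : Bool) : Decidable (Spec_pagebar_div_py attrs out) := by unfold Spec_pagebar_div_py; infer_instance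

-- ===== CLAIM (what is proved, stated in full; the proofs are below) =====
def Claim_equal_pagebar_div_py : Prop := ∀ (attrs : List (String × String)), Dom_pagebar_div_py attrs → Spec_pagebar_div_py attrs (pagebar_div_py attrs)

-- ===== LEMMAS AND PROOFS =====
theorem pagebar_fold_inv (attrs : List (String × String)) (cp ic : Bool) :
    attrs.foldl (fun (s : Bool × Bool) attr =>
      if attr.1 == "class" && attr.2 == "p" then (true, s.2)
      else if attr.1 == "id" && attr.2 == "pagebar_container" then (s.1, true)
      else s) (cp, ic)
    = (cp || attrs.any (fun a => a.1 == "class" && a.2 == "p"),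
       ic || attrs.any (fun a => a.1 == "id" && a.2 == "pagebar_container")) := by
  induction attrs generalizing cp ic with
  | nil => simp
  | cons a t ih =>
    simp only [List.foldl_cons, List.any_cons]
    by_cases h1 : (a.1 == "class" && a.2 == "p") = true
    · have h2 : (a.1 == "id" && a.2 == "pagebar_container") = false := by
        rcases (Bool.and_eq_true ..).mp h1 with ⟨ha, _⟩
        simp_all
      rw [if_pos h1, ih]
      simp [h1, h2]
    · by_cases h2 : (a.1 == "id" && a.2 == "pagebar_container") = true
      · rw [if_neg h1, if_pos h2, ih]
        simp only [Bool.not_eq_true] at h1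
        simp [h1, h2]
      · rw [if_neg h1, if_neg h2, ih]
        simp only [Bool.not_eq_true] at h1 h2
        simp [h1, h2]

-- ===== VERDICT (by name: the statement is the Claim_ definition above) =====
theorem pagebar_bool_if_id (b : Bool) : (if b then true else false) = b := by
  cases b <;> simp

theorem pagebar_div_py_spec : Claim_equal_pagebar_div_py := by
  intro attrs _
  unfold Spec_pagebar_div_py pagebar_div_py pagebar_div_py_alt
  cases attrs with
  | nil => simp
  | cons a t =>
    rw [if_neg (by simp), pagebar_fold_inv]
    simp only [Bool.false_or]
    exact pagebar_bool_if_id _
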